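-- pv_equiv track=rewrite | github.com/oalansilva/crypto | scripts/reconcile_archived_coordination.py | ensure_closed
-- ===== SOURCE A (Python) =====
-- def ensure_closed(md: str) -> str:
--     if "\n## Closed\n" not in md and not md.strip().endswith("## Closed"):
--         # Insert Closed section right after Status block if possible.
--         lines = md.splitlines()
--         out = []
--         inserted = False
--         i = 0
--         while i < len(lines):
--             out.append(lines[i])
--             if lines[i].strip() == "## Status":
--                 # copy until next header
--                 i += 1
--                 while i < len(lines) and not lines[i].strip().startswith("## "):
--                     out.append(lines[i])
--                     i += 1
--                 out.append("")
--                 out.append("## Closed")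
--                 out.append("")
--                 out.append("- Homologated by Alan and archived.")
--                 out.append("")
--                 inserted = True
--                 continue
--             i += 1
--         if not inserted:
--             out.append("")
--             out.append("## Closed")
--             out.append("")
--             out.append("- Homologated by Alan and archived.")
--         md = "\n".join(out) + "\n"
--     return md
-- ===== SOURCE B (Python) =====
-- def ensure_closed(md: str) -> str:
--     # Single pass with a "last header was '## Status'" flag instead of A's nested index loops.
--     if "\n## Closed\n" in md or md.strip().endswith("## Closed"):
--         return md
--     block = ["", "## Closed", "", "- Homologated by Alan and archived."]
--     out = []
--     after_status = False
--     found = False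
--     for ln in md.splitlines():
--         s = ln.strip()
--         if s.startswith("## "):
--             if after_status:
--                 out += block + [""]
--             after_status = s == "## Status"
--             found = found or after_status
--         out.append(ln)
--     if after_status:
--         out += block + [""]
--     elif not found:
--         out += block
--     return "\n".join(out) + "\n"
-- ===== Notes on version B (the rewrite author's own statement) =====
-- stated objective: simpler
-- what changed: Replaces A's nested index-based while loops (outer scan plus inner block-copying loop with continue) by one flat pass over the lines carrying a boolean flag recording whether the most recent header was the Status header, flushing the Closed block at the next header or at the end.
import Mathlib
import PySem

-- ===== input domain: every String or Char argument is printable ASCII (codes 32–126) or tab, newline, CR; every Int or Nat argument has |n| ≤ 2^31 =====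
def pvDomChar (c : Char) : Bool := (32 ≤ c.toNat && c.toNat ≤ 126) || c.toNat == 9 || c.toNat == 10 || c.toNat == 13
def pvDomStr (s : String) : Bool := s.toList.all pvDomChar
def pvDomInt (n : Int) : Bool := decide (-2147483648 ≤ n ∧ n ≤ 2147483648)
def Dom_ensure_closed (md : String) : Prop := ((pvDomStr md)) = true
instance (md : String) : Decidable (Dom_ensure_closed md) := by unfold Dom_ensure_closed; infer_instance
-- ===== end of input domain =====

-- B replaces A's nested index-based while loops by one flat pass with a
-- "last header was '## Status'" flag; same cost, simpler control flow.

-- shared literals/predicates (both Pythons compute strip()/startswith the same way)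
def pvIsHdr (s : String) : Bool := PySem.Str.startswith (PySem.Str.strip s) "## "
def pvIsStatus (s : String) : Bool := PySem.Str.strip s == "## Status"
def pvBlock : List String := ["", "## Closed", "", "- Homologated by Alan and archived."]

-- ===== PORT A =====
-- A's outer while over index i with the inner copy-until-next-header while;
-- the inner while is the takeWhile/dropWhile split of the remaining lines.
def pvLoopA : List String → List String × Bool
  | [] => ([], false)
  | l :: rest =>
    if pvIsStatus l then
      (l :: (rest.takeWhile (fun x => !pvIsHdr x) ++ pvBlock ++ [""]
              ++ (pvLoopA (rest.dropWhile (fun x => !pvIsHdr x))).1), true)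
    else
      let r := pvLoopA rest
      (l :: r.1, r.2)
  termination_by lines => lines.length
  decreasing_by
    · have := List.length_dropWhile_le (fun x => !pvIsHdr x) rest
      simp; omega
    · simp

def ensure_closed (md : String) : String :=
  if !(PySem.Str.isIn "\n## Closed\n" md)
      && !(PySem.Str.endswith (PySem.Str.strip md) "## Closed") then
    let r := pvLoopA (PySem.Str.splitlines md)
    let out := if r.2 then r.1 else r.1 ++ pvBlock
    PySem.Str.join "\n" out ++ "\n"
  else md

-- ===== PORT B =====
-- Source B's single for-loop body: state (out, after_status, found)
def pvStepB (acc : List String × Bool × Bool) (ln : String) : List String × Bool × Bool :=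
  let s := PySem.Str.strip ln
  if PySem.Str.startswith s "## " then
    let out := if acc.2.1 then acc.1 ++ pvBlock ++ [""] else acc.1
    let a := s == "## Status"
    (out ++ [ln], a, acc.2.2 || a)
  else (acc.1 ++ [ln], acc.2.1, acc.2.2)

def ensure_closed_alt (md : String) : String :=
  if PySem.Str.isIn "\n## Closed\n" md
      || PySem.Str.endswith (PySem.Str.strip md) "## Closed" then md
  else
    let r := (PySem.Str.splitlines md).foldl pvStepB ([], false, false)
    let out := if r.2.1 then r.1 ++ pvBlock ++ [""]
               else if !r.2.2 then r.1 ++ pvBlock else r.1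
    PySem.Str.join "\n" out ++ "\n"

-- ===== PRECONDITION & SPEC =====
def Spec_ensure_closed (md : String) (out : String) : Prop := out = ensure_closed_alt md
instance (md : String) (out : String) : Decidable (Spec_ensure_closed md out) := by unfold Spec_ensure_closed; infer_instance

-- ===== CLAIM (what is proved, stated in full; the proofs are below) =====
def Claim_equal_ensure_closed : Prop := ∀ (md : String), Dom_ensure_closed md → Spec_ensure_closed md (ensure_closed md)

-- ===== LEMMAS AND PROOFS =====

theorem pvHdr_of_status {l : String} (h : pvIsStatus l = true) : pvIsHdr l = true := by
  unfold pvIsStatus at h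
  unfold pvIsHdr
  rw [beq_iff_eq] at h
  rw [h]
  decide

-- the foldl's out-component is the accumulator followed by the run from []
theorem pvFoldB_acc (lines : List String) :
    ∀ (out : List String) (b f : Bool),
      lines.foldl pvStepB (out, b, f)
        = (out ++ (lines.foldl pvStepB (([] : List String), b, f)).1,
           (lines.foldl pvStepB (([] : List String), b, f)).2) := by
  induction lines with
  | nil => intro out b f; simp
  | cons l rest ih =>
    intro out b f
    simp only [List.foldl_cons]
    by_cases h : PySem.Str.startswith (PySem.Str.strip l) "## "
    · simp only [pvStepB, h, if_true]
      by_cases hb : b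
      · subst hb
        simp only [if_true]
        rw [ih (out ++ pvBlock ++ [""] ++ [l]), ih (([] : List String) ++ pvBlock ++ [""] ++ [l])]
        simp
      · simp only [hb, if_false, Bool.false_eq_true]
        rw [ih (out ++ [l]), ih (([] : List String) ++ [l])]
        simp
    · simp only [pvStepB, h, if_false, Bool.false_eq_true]
      rw [ih (out ++ [l]), ih (([] : List String) ++ [l])]
      simp

-- the out- and after-components do not depend on the found flag
theorem pvFoldB_found_irrel (lines : List String) :
    ∀ (out : List String) (b f f' : Bool),
      (lines.foldl pvStepB (out, b, f)).1 = (lines.foldl pvStepB (out, b, f')).1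
      ∧ (lines.foldl pvStepB (out, b, f)).2.1 = (lines.foldl pvStepB (out, b, f')).2.1 := by
  induction lines with
  | nil => intro out b f f'; simp
  | cons l rest ih =>
    intro out b f f'
    simp only [List.foldl_cons, pvStepB]
    by_cases h : PySem.Str.startswith (PySem.Str.strip l) "## "
    · simp only [h, if_true]
      exact ih _ _ _ _
    · simp only [h, if_false, Bool.false_eq_true]
      exact ih _ _ _ _

-- the found-component is: initial value OR some line is a Status header
theorem pvFoldB_found (lines : List String) :
    ∀ (out : List String) (b f : Bool),
      (lines.foldl pvStepB (out, b, f)).2.2 = (f || lines.any pvIsStatus) := by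
  induction lines with
  | nil => intro out b f; simp
  | cons l rest ih =>
    intro out b f
    simp only [List.foldl_cons, pvStepB, List.any_cons]
    by_cases h : PySem.Str.startswith (PySem.Str.strip l) "## "
    · simp only [h, if_true]
      rw [ih]
      simp [pvIsStatus, Bool.or_assoc]
    · simp only [h, if_false, Bool.false_eq_true]
      rw [ih]
      have hst : pvIsStatus l = false := by
        by_contra hc
        exact h (pvHdr_of_status (by simpa using hc))
      rw [hst]
      simp
  
-- if after_status ends true then either it started true or a Status line was seen
theorem pvFoldB_after (lines : List String) :
    ∀ (out : List String) (b f : Bool),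
      (lines.foldl pvStepB (out, b, f)).2.1 = true → b = true ∨ lines.any pvIsStatus = true := by
  induction lines with
  | nil =>
    intro out b f h
    simp only [List.foldl_nil] at h
    exact Or.inl h
  | cons l rest ih =>
    intro out b f h
    simp only [List.foldl_cons, pvStepB] at h
    simp only [List.any_cons]
    by_cases hh : PySem.Str.startswith (PySem.Str.strip l) "## "
    · simp only [hh, if_true] at h
      rcases ih _ _ _ h with h1 | h1
      · right; rw [show pvIsStatus l = true from h1]; simp
      · right; rw [h1]; simp
    · simp only [hh, if_false, Bool.false_eq_true] at h
      rcases ih _ _ _ h with h1 | h1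
      · exact Or.inl h1
      · right; rw [h1]; simp

-- B's loop result plus its pending-block flush, as one function of (lines, flag)
def pvG (lines : List String) (b : Bool) : List String :=
  (lines.foldl pvStepB (([] : List String), b, false)).1
    ++ (if (lines.foldl pvStepB (([] : List String), b, false)).2.1 then pvBlock ++ [""] else [])

theorem pvG_cons_nonhdr {l : String} (rest : List String) (b : Bool)
    (h : pvIsHdr l = false) : pvG (l :: rest) b = l :: pvG rest b := by
  unfold pvG
  simp only [List.foldl_cons, pvStepB]
  unfold pvIsHdr at h
  simp only [h, Bool.false_eq_true, if_false, List.nil_append]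
  rw [pvFoldB_acc rest [l] b false]
  simp

theorem pvG_cons_hdr {l : String} (rest : List String) (b : Bool)
    (h : pvIsHdr l = true) :
    pvG (l :: rest) b = (if b then pvBlock ++ [""] else []) ++ l :: pvG rest (pvIsStatus l) := by
  unfold pvG
  simp only [List.foldl_cons, pvStepB]
  unfold pvIsHdr at h
  simp only [h, if_true, Bool.false_or]
  obtain ⟨e1, e2⟩ := pvFoldB_found_irrel rest
      ((if b = true then ([] : List String) ++ pvBlock ++ [""] else []) ++ [l])
      (PySem.Str.strip l == "## Status") (PySem.Str.strip l == "## Status") false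
  rw [e1, e2]
  by_cases hb : b
  · subst hb
    simp only [if_true, List.nil_append]
    rw [show pvBlock ++ [""] ++ [l] = (pvBlock ++ [""]) ++ [l] by simp]
    rw [pvFoldB_acc rest ((pvBlock ++ [""]) ++ [l]) (PySem.Str.strip l == "## Status") false]
    simp [pvIsStatus]
  · simp only [hb, Bool.false_eq_true, if_false, List.nil_append]
    rw [pvFoldB_acc rest [l] (PySem.Str.strip l == "## Status") false]
    simp [pvIsStatus]

-- with the flag set, B flushes the pending block at the next header (or at the end)
theorem pvG_true (lines : List String) :
    pvG lines true
      = lines.takeWhile (fun x => !pvIsHdr x) ++ pvBlock ++ [""]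
        ++ pvG (lines.dropWhile (fun x => !pvIsHdr x)) false := by
  induction lines with
  | nil => unfold pvG; simp
  | cons l rest ih =>
    by_cases h : pvIsHdr l
    · rw [pvG_cons_hdr rest true h]
      have ht : (l :: rest).takeWhile (fun x => !pvIsHdr x) = [] := by
        simp [h]
      have hd : (l :: rest).dropWhile (fun x => !pvIsHdr x) = l :: rest := by
        simp [h]
      rw [ht, hd, pvG_cons_hdr rest false h]
      simp
    · have h' : pvIsHdr l = false := by simpa using h
      rw [pvG_cons_nonhdr rest true h', ih]
      have ht : (l :: rest).takeWhile (fun x => !pvIsHdr x)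
          = l :: rest.takeWhile (fun x => !pvIsHdr x) := by
        simp [h']
      have hd : (l :: rest).dropWhile (fun x => !pvIsHdr x)
          = rest.dropWhile (fun x => !pvIsHdr x) := by
        simp [h']
      rw [ht, hd]
      simp

-- main invariant: B's flushed pass equals A's nested-loop output
theorem pvG_eq_loopA (lines : List String) : pvG lines false = (pvLoopA lines).1 := by
  induction lines using pvLoopA.induct with
  | case1 => unfold pvG pvLoopA; simp
  | case2 l rest hst ih =>
    rw [pvG_cons_hdr rest false (pvHdr_of_status hst)]
    rw [show pvIsStatus l = true from hst]
    rw [pvG_true, ih]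
    conv_rhs => rw [pvLoopA]
    simp [hst]
  | case3 l rest hst ih =>
    by_cases h : pvIsHdr l
    · rw [pvG_cons_hdr rest false h]
      rw [show pvIsStatus l = false by simpa using hst]
      conv_rhs => rw [pvLoopA]
      simp [hst, ih]
    · rw [pvG_cons_nonhdr rest false (by simpa using h)]
      conv_rhs => rw [pvLoopA]
      simp [hst, ih]

-- A's inserted flag is: some line is a Status header
theorem pvLoopA_inserted (lines : List String) :
    (pvLoopA lines).2 = lines.any pvIsStatus := by
  induction lines using pvLoopA.induct with
  | case1 => unfold pvLoopA; simp
  | case2 l rest hst ih =>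
    conv_lhs => rw [pvLoopA]
    simp [hst]
  | case3 l rest hst ih =>
    conv_lhs => rw [pvLoopA]
    simp only [hst, Bool.false_eq_true, if_false, List.any_cons]
    rw [ih]
    simp

-- ===== VERDICT (by name: the statement is the Claim_ definition above) =====
theorem ensure_closed_spec : Claim_equal_ensure_closed := by
  intro md _
  unfold Spec_ensure_closed ensure_closed ensure_closed_alt
  cases hx : PySem.Str.isIn "\n## Closed\n" md with
  | true => norm_num
  | false =>
  cases hy : PySem.Str.endswith (PySem.Str.strip md) "## Closed" with
  | true => norm_num
  | false =>
    rw [if_pos (by decide), if_neg (by decide)]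
    set lines := PySem.Str.splitlines md with hl
    have hG := pvG_eq_loopA lines
    unfold pvG at hG
    have hIns := pvLoopA_inserted lines
    have hF := pvFoldB_found lines ([] : List String) false false
    set r := lines.foldl pvStepB (([] : List String), false, false) with hr
    by_cases ha : r.2.1
    · have hAny : lines.any pvIsStatus = true := by
        rcases pvFoldB_after lines ([] : List String) false false (by rw [← hr]; exact ha) with h | h
        · exact absurd h (by simp)
        · exact h
      simp only [ha, if_true] at hG ⊢
      rw [hIns, hAny]
      simp only [if_true]
      rw [← hG]
      simp
    · have ha' : r.2.1 = false := by simpa using ha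
      simp only [ha', Bool.false_eq_true, if_false, List.append_nil] at hG ⊢
      have hF' : r.2.2 = lines.any pvIsStatus := by simpa using hF
      rw [hIns, ← hF']
      by_cases hf : r.2.2
      · rw [show r.2.2 = true from hf]
        simp [← hG]
      · rw [show r.2.2 = false by simpa using hf]
        simp [← hG]
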